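-- pv_equiv track=rewrite | github.com/VishalDeoPrasad/Python-Problem | previous and next.py | solve
-- ===== SOURCE A (Python) =====
-- def solve(A):
--     new_A = []
--     for i in range(len(A)): # 0, 1, 2, 3, 4
--         if i == 0:
--             #A[i] = A[i]*A[i+1]
--             if len(A) == 1:
--                 return A
--             new_A.append(A[i]*A[i+1])
--         elif i == len(A)-1:
--             #A[i] = A[i]*A[i-1]
--             new_A.append(A[i]*A[i-1])
--         else:
--             #A[i] = A[i-1]*A[i+1]
--             new_A.append(A[i-1]*A[i+1])
--     return new_A
-- ===== SOURCE B (Python) =====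
-- def solve(A):
--     if len(A) <= 1:
--         return A
--     left = [A[0]] + A[:-1]
--     right = A[1:] + [A[-1]]
--     return [l * r for l, r in zip(left, right)]
-- ===== Notes on version B (the rewrite author's own statement) =====
-- stated objective: simpler
-- what changed: Replaces the indexed loop with three per-index branches (and an early return buried inside the loop body) by two clamped shifted copies of the list zipped with multiplication, with a single up-front len<=1 guard.
import Mathlib
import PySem

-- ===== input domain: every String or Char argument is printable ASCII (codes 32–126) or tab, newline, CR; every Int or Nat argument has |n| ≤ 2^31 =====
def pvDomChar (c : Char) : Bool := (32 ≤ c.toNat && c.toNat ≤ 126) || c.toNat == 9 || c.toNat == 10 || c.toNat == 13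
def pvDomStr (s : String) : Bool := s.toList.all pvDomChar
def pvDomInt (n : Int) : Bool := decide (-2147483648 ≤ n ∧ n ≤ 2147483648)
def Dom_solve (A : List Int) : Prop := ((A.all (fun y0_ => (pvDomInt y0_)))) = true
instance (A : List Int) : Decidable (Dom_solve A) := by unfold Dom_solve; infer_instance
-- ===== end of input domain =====

-- B replaces A's per-index three-way branching loop (with an early return inside it) by
-- zipping two clamped shifted copies of the list; same O(n) cost, plainer decomposition.

-- ===== PORT A =====
-- the indexed loop 'for i in range(len(A))' with its early return at i = 0;
-- all Python index accesses are in range here, so List.getD is exact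
def solveLoop (A : List Int) (i : Nat) (acc : List Int) : List Int :=
  if i < A.length then
    if i = 0 then
      if A.length = 1 then A
      else solveLoop A (i+1) (acc ++ [A.getD i 0 * A.getD (i+1) 0])
    else if i = A.length - 1 then
      solveLoop A (i+1) (acc ++ [A.getD i 0 * A.getD (i-1) 0])
    else
      solveLoop A (i+1) (acc ++ [A.getD (i-1) 0 * A.getD (i+1) 0])
  else acc
termination_by A.length - i

def solve (A : List Int) : List Int := solveLoop A 0 []

-- ===== PORT B =====
def solve_alt (A : List Int) : List Int :=
  if A.length ≤ 1 then A
  else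
    let left := (PySem.List.pyGet? A 0).getD 0 :: PySem.List.slice A none (some (-1))
    let right := PySem.List.slice A (some 1) none ++ [(PySem.List.pyGet? A (-1)).getD 0]
    List.zipWith (· * ·) left right

-- ===== PRECONDITION & SPEC =====
def Spec_solve (A : List Int) (out : List Int) : Prop := out = solve_alt A
instance (A : List Int) (out : List Int) : Decidable (Spec_solve A out) := by unfold Spec_solve; infer_instance

-- ===== CLAIM (what is proved, stated in full; the proofs are below) =====
def Claim_equal_solve : Prop := ∀ (A : List Int), Dom_solve A → Spec_solve A (solve A)

-- ===== LEMMAS AND PROOFS =====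

-- value A's loop appends at index m (for m ≥ 1)
def entryA (A : List Int) (m : Nat) : Int :=
  if m = A.length - 1 then A.getD m 0 * A.getD (m-1) 0
  else A.getD (m-1) 0 * A.getD (m+1) 0

lemma solveLoop_eq (A : List Int) (_h2 : 2 ≤ A.length) :
    ∀ k i acc, A.length - i ≤ k → 1 ≤ i →
      solveLoop A i acc = acc ++ (List.range (A.length - i)).map (fun j => entryA A (i + j)) := by
  intro k
  induction k with
  | zero =>
    intro i acc hk hi
    have hge : A.length ≤ i := by omega
    unfold solveLoop
    simp [Nat.not_lt.mpr hge, Nat.sub_eq_zero_of_le hge]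
  | succ k ih =>
    intro i acc hk hi
    by_cases hlt : i < A.length
    · unfold solveLoop
      have hi0 : ¬ i = 0 := by omega
      rw [if_pos hlt, if_neg hi0]
      have hrange : A.length - i = (A.length - (i+1)) + 1 := by omega
      have hmap : (List.range (A.length - i)).map (fun j => entryA A (i + j))
          = entryA A i :: (List.range (A.length - (i+1))).map (fun j => entryA A (i + 1 + j)) := by
        rw [hrange, List.range_succ_eq_map]
        simp only [List.map_map, List.map_cons]
        congr 1
        apply List.map_congr_left
        intro j _
        show entryA A (i + (j + 1)) = entryA A (i + 1 + j)
        congr 1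
        omega
      by_cases hlast : i = A.length - 1
      · rw [if_pos hlast, ih (i+1) _ (by omega) (by omega)]
        rw [hmap]
        simp [entryA, hlast]
      · rw [if_neg hlast, ih (i+1) _ (by omega) (by omega)]
        rw [hmap]
        simp [entryA, hlast]
    · have hge : A.length ≤ i := by omega
      unfold solveLoop
      simp [Nat.not_lt.mpr hge, Nat.sub_eq_zero_of_le hge]

lemma solve_eq_of_two_le (A : List Int) (h2 : 2 ≤ A.length) :
    solve A = A.getD 0 0 * A.getD 1 0 :: (List.range (A.length - 1)).map (fun j => entryA A (1 + j)) := by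
  unfold solve
  unfold solveLoop
  have h0 : 0 < A.length := by omega
  have h1 : ¬ A.length = 1 := by omega
  rw [if_pos h0, if_pos rfl, if_neg h1]
  rw [solveLoop_eq A h2 (A.length) 1 _ (by omega) (by omega)]
  simp

theorem solve_spec' : ∀ (A : List Int), solve A = solve_alt A := by
  intro A
  rcases hn : A.length with _ | n
  · -- empty list
    have hA : A = [] := List.length_eq_zero_iff.mp hn
    subst hA
    simp [solve, solveLoop, solve_alt]
  · rcases n with _ | m
    · -- singleton
      unfold solve solveLoop solve_alt
      simp [hn]
    · -- length ≥ 2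
      have h2 : 2 ≤ A.length := by omega
      have hne : ¬ A.length ≤ 1 := by omega
      rw [solve_eq_of_two_le A h2]
      unfold solve_alt
      rw [if_neg hne]
      simp only [PySem.List.slice_to_neg_one, PySem.List.slice_from_one,
        PySem.List.pyGet?_neg_one]
      apply List.ext_getElem
      · simp [hn]
      · intro i hL hR
        have hlen : A.length = m + 2 := by omega
        have hgetD : ∀ (j : Nat) (hj : j < A.length), A.getD j 0 = A[j] :=
          fun j hj => List.getD_eq_getElem A 0 hj
        have hi : i < m + 2 := by
          have := hL; simp [hlen] at this; omega
        rw [List.getElem_zipWith]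
        match i, hi with
        | 0, _ =>
          simp only [List.getElem_cons_zero]
          rw [List.getElem_append_left (by simp [hlen])]
          rw [List.getElem_tail]
          have h0 : (PySem.List.pyGet? A 0).getD 0 = A[0]'(by omega) := by
            rw [show (0 : Int) = ((0 : Nat) : Int) from rfl, PySem.List.pyGet?_natCast,
              List.getElem?_eq_getElem (by omega), Option.getD_some]
          rw [h0, hgetD 0 (by omega), hgetD 1 (by omega)]
        | i + 1, hi =>
          simp only [List.getElem_cons_succ, List.getElem_map, List.getElem_range,
            List.getElem_dropLast]
          by_cases hmid : i + 1 < A.length - 1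
          · rw [List.getElem_append_left (by simp [hlen]; omega), List.getElem_tail]
            have h1i : ¬ (1 + i = A.length - 1) := by omega
            rw [entryA, if_neg h1i]
            have e1 : 1 + i - 1 = i := by omega
            have e2 : 1 + i + 1 = i + 1 + 1 := by omega
            rw [e1, e2, hgetD i (by omega), hgetD (i + 1 + 1) (by omega)]
          · have hilast : i + 1 = A.length - 1 := by omega
            rw [List.getElem_append_right (by simp [hlen]; omega)]
            have hgl : A.getLast?.getD 0 = A[A.length - 1]'(by omega) := by
              rw [List.getLast?_eq_getElem?]
              rw [List.getElem?_eq_getElem (by omega : A.length - 1 < A.length), Option.getD_some]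
            simp only [List.getElem_singleton, hgl]
            have h1i : 1 + i = A.length - 1 := by omega
            rw [entryA, if_pos h1i]
            have e2 : A.length - 1 - 1 = i := by omega
            rw [h1i, e2, hgetD (A.length - 1) (by omega), hgetD i (by omega), mul_comm]

-- ===== VERDICT (by name: the statement is the Claim_ definition above) =====
theorem solve_spec : Claim_equal_solve := by
  intro A _
  unfold Spec_solve
  exact solve_spec' A
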